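-- pv_equiv track=rewrite | github.com/GMcDowellJr/Revit_Fingerprint | tools/similarity_compare.py | _domain_union_mass
-- ===== SOURCE A (Python) =====
-- from collections import Counter
-- from typing import Any, Dict, Iterable, List, Optional, Tuple
--
-- def _domain_union_mass(sig_a: Optional[List[str]], sig_b: Optional[List[str]]) -> Optional[int]:
--     if sig_a is None or sig_b is None:
--         return None
--     ca = Counter(sig_a)
--     cb = Counter(sig_b)
--     keys = set(ca.keys()) | set(cb.keys())
--     mass = 0
--     for k in keys:
--         mass += max(ca.get(k, 0), cb.get(k, 0))
--     return mass
-- ===== SOURCE B (Python) =====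
-- from collections import Counter
-- from typing import List, Optional
--
--
-- def _domain_union_mass(sig_a: Optional[List[str]], sig_b: Optional[List[str]]) -> Optional[int]:
--     # One consuming pass over sig_b: each b-element either consumes a matching
--     # remaining a-occurrence (contributing nothing new) or enlarges the union.
--     if sig_a is None or sig_b is None:
--         return None
--     rem = Counter(sig_a)
--     mass = len(sig_a)
--     for x in sig_b:
--         if rem.get(x, 0) > 0:
--             rem[x] -= 1
--         else:
--             mass += 1
--     return mass
-- ===== Notes on version B (the rewrite author's own statement) =====
-- stated objective: alternative
-- what changed: B replaces the two-counter, union-of-keys sum of elementwise maxima by a single consuming pass over sig_b: starting from mass=len(sig_a) and a remaining-count dict of sig_a, each element of sig_b either decrements its remaining count or increments the mass; no second counter and no key-set union is built.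
import Mathlib
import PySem

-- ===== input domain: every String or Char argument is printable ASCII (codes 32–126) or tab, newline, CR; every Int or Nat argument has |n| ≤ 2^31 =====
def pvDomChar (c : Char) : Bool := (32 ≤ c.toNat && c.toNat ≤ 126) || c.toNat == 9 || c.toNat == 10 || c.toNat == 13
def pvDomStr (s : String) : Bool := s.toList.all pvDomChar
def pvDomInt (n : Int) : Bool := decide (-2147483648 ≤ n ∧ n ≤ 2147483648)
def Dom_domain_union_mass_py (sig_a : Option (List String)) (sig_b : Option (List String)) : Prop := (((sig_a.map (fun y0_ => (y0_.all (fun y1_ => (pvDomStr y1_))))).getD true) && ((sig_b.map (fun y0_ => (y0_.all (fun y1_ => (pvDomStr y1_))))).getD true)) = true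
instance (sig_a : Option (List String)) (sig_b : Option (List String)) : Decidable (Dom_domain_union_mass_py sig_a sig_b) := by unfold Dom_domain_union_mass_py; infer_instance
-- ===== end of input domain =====

-- B replaces A's two-counter union-of-keys max-sum by a single consuming pass over sig_b (alternative decomposition, same cost).

-- ===== PORT A =====
-- Port of A: counters of both lists, union of key-sets, fold summing elementwise maxima.
def domain_union_mass_py (sig_a : Option (List String)) (sig_b : Option (List String)) : Option Int :=
  match sig_a, sig_b with
  | none, _ => none
  | some _, none => none
  | some a, some b =>
    let ca := PySem.Dict.counter a
    let cb := PySem.Dict.counter b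
    let keys := PySem.Set.union (PySem.Set.ofList ca.keys) (PySem.Set.ofList cb.keys)
    some (keys.foldl (fun mass k => mass + max (ca.getD k 0) (cb.getD k 0)) 0)

-- ===== PORT B =====
-- Port of B: mass starts at len(sig_a); one pass over sig_b consumes remaining
-- a-occurrences from a dict, or increments the mass when none remain.
def domain_union_mass_py_alt (sig_a : Option (List String)) (sig_b : Option (List String)) : Option Int :=
  match sig_a, sig_b with
  | none, _ => none
  | some _, none => none
  | some a, some b =>
    let st := b.foldl
      (fun st x =>
        if st.1.getD x 0 > 0 then (st.1.insert x (st.1.getD x 0 - 1), st.2)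
        else (st.1, st.2 + 1))
      (PySem.Dict.counter a, (a.length : Int))
    some st.2

-- ===== PRECONDITION & SPEC =====
def Spec_domain_union_mass_py (sig_a : Option (List String)) (sig_b : Option (List String)) (out : Option Int) : Prop := out = domain_union_mass_py_alt sig_a sig_b
instance (sig_a : Option (List String)) (sig_b : Option (List String)) (out : Option Int) : Decidable (Spec_domain_union_mass_py sig_a sig_b out) := by unfold Spec_domain_union_mass_py; infer_instance

-- ===== CLAIM (what is proved, stated in full; the proofs are below) =====
def Claim_equal_domain_union_mass_py : Prop := ∀ (sig_a : Option (List String)) (sig_b : Option (List String)), Dom_domain_union_mass_py sig_a sig_b → Spec_domain_union_mass_py sig_a sig_b (domain_union_mass_py sig_a sig_b)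

-- ===== LEMMAS AND PROOFS =====

-- Sum of an Int-valued function over a nodup list as a Finset sum.
theorem pv_sum_nodup_toFinset (L : List String) (h : L.Nodup) (f : String → Int) :
    (L.map f).sum = ∑ x ∈ L.toFinset, f x :=
  (List.sum_toFinset f h).symm

-- The union key-set's Finset is the union of the two lists' Finsets.
theorem pv_union_toFinset (a b : List String) :
    (PySem.Set.union (PySem.Set.ofList a) (PySem.Set.ofList b)).toFinset = a.toFinset ∪ b.toFinset := by
  ext x
  simp [List.mem_toFinset, PySem.Set.mem_union, PySem.Set.mem_ofList]

-- Extending a count-sum from xs.toFinset to a superset adds nothing.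
theorem pv_sum_count_subset (xs : List String) (S : Finset String) (hS : xs.toFinset ⊆ S)
    (g : String → Int) (hg : ∀ x, x ∉ xs → g x = 0) :
    ∑ x ∈ S, g x = ∑ x ∈ xs.toFinset, g x :=
  (Finset.sum_subset hS (fun x _ hx => hg x (by simpa [List.mem_toFinset] using hx))).symm

-- Invariant of B's consuming fold: starting from a nonnegative remaining-count
-- dict rem and mass, the final mass is mass plus the totial excess of t over rem.
theorem pv_consume_fold (t : List String) (S : Finset String) (ht : ∀ x ∈ t, x ∈ S)
    (rem : PySem.Dict String Int) (hnn : ∀ k, 0 ≤ rem.getD k 0) (mass : Int) :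
    (t.foldl
      (fun st x =>
        if st.1.getD x 0 > 0 then (st.1.insert x (st.1.getD x 0 - 1), st.2)
        else (st.1, st.2 + 1))
      (rem, mass)).2
    = mass + ∑ k ∈ S, max ((t.count k : Int) - rem.getD k 0) 0 := by
  induction t generalizing rem mass with
  | nil =>
    simp only [List.foldl_nil, List.count_nil, Int.natCast_zero, zero_sub]
    have : ∀ k ∈ S, max (-(rem.getD k 0)) 0 = 0 := by
      intro k _; have := hnn k; omega
    rw [Finset.sum_congr rfl this]
    simp
  | cons x t' ih =>
    have hxS : x ∈ S := ht x (List.mem_cons_self)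
    have ht' : ∀ y ∈ t', y ∈ S := fun y hy => ht y (List.mem_cons_of_mem _ hy)
    simp only [List.foldl_cons]
    by_cases h : rem.getD x 0 > 0
    · rw [if_pos h]
      rw [ih ht' _ (fun k => by
          rw [PySem.Dict.getD_insert]
          split_ifs with hk
          · omega
          · exact hnn k) mass]
      congr 1
      refine Finset.sum_congr rfl (fun k _ => ?_)
      rw [PySem.Dict.getD_insert]
      by_cases hk : k = x
      · subst hk
        simp only [List.count_cons_self]
        push_cast; omega
      · rw [if_neg hk, List.count_cons_of_ne (Ne.symm hk)]
    · rw [if_neg h]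
      rw [ih ht' rem hnn (mass + 1)]
      have hstep : ∀ k ∈ S,
          max (((x :: t').count k : Int) - rem.getD k 0) 0
            = max ((t'.count k : Int) - rem.getD k 0) 0 + (if k = x then 1 else 0) := by
        intro k _
        by_cases hk : k = x
        · subst hk
          have := hnn k
          simp only [List.count_cons_self]
          push_cast; omega
        · rw [if_neg hk, List.count_cons_of_ne (Ne.symm hk)]
          omega
      rw [Finset.sum_congr rfl hstep, Finset.sum_add_distrib, Finset.sum_ite_eq' S x (fun _ => (1 : Int)), if_pos hxS]
      ring

-- ===== VERDICT (by name: the statement is the Claim_ definition above) =====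
theorem domain_union_mass_py_spec : Claim_equal_domain_union_mass_py := by
  intro sig_a sig_b _
  unfold Spec_domain_union_mass_py domain_union_mass_py domain_union_mass_py_alt
  match sig_a, sig_b with
  | none, _ => rfl
  | some _, none => rfl
  | some a, some b =>
    simp only [Option.some.injEq]
    -- A's side: a Finset sum of maxima over the union of key-sets.
    rw [PySem.Dict.keys_counter, PySem.Dict.keys_counter, PySem.Set.ofList_ofList,
      PySem.Set.ofList_ofList, PySem.List.foldl_add]
    have hgetD : ∀ (xs : List String) (k : String),
        (PySem.Dict.counter xs).getD k 0 = (xs.count k : Int) := by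
      intro xs k; exact PySem.Dict.getD_counter xs k
    simp only [hgetD]
    rw [pv_sum_nodup_toFinset _ (PySem.Set.nodup_union _ _ (PySem.Set.nodup_ofList a)),
      pv_union_toFinset]
    -- B's side: the consuming-fold invariant over the same Finset.
    rw [pv_consume_fold b (a.toFinset ∪ b.toFinset)
      (fun x hx => Finset.mem_union_right _ (List.mem_toFinset.mpr hx))
      (PySem.Dict.counter a) (fun k => by rw [hgetD]; exact Int.natCast_nonneg _) _]
    simp only [hgetD]
    -- Pointwise: max(ca, cb) = ca + max(cb - ca, 0), and Σ ca over the union = len a.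
    have hpt : ∀ k ∈ a.toFinset ∪ b.toFinset,
        max ((a.count k : Int)) ((b.count k : Int))
          = (a.count k : Int) + max ((b.count k : Int) - (a.count k : Int)) 0 := by
      intro k _; omega
    rw [Finset.sum_congr rfl hpt, Finset.sum_add_distrib]
    have ha : ∑ x ∈ a.toFinset ∪ b.toFinset, (a.count x : Int) = (a.length : Int) := by
      rw [pv_sum_count_subset a _ Finset.subset_union_left _
        (fun x hx => by simp [List.count_eq_zero_of_not_mem hx])]
      push_cast [← List.sum_toFinset_count_eq_length a]
      rfl
    rw [ha]
    ring
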